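-- pv_equiv track=rewrite | github.com/chrisVat/pringle | gaming_time.py | detect_id_column
-- ===== SOURCE A (Python) =====
-- def detect_id_column(header):
--     if header is None:
--         return 0
--     lowered = [h.strip().lower() for h in header]
--     for key in ["numeric_id", "node_id", "id", "userid", "user_id"]:
--         if key in lowered:
--             return lowered.index(key)
--     return 0
-- ===== SOURCE B (Python) =====
-- RANK = {"numeric_id": 0, "node_id": 1, "id": 2, "userid": 3, "user_id": 4}
--
--
-- def detect_id_column(header):
--     if header is None:
--         return 0
--     best_rank = 5
--     best_index = 0
--     for i, h in enumerate(header):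
--         r = RANK.get(h.strip().lower(), 5)
--         if r < best_rank:
--             best_rank = r
--             best_index = i
--     return best_index
-- ===== Notes on version B (the rewrite author's own statement) =====
-- stated objective: alternative
-- what changed: Replaces A's per-key membership test plus list.index rescans (up to 5 passes over the headers) with a single left-to-right pass that keeps the best (lowest) rank and its first index, using a fixed rank map.
import Mathlib
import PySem

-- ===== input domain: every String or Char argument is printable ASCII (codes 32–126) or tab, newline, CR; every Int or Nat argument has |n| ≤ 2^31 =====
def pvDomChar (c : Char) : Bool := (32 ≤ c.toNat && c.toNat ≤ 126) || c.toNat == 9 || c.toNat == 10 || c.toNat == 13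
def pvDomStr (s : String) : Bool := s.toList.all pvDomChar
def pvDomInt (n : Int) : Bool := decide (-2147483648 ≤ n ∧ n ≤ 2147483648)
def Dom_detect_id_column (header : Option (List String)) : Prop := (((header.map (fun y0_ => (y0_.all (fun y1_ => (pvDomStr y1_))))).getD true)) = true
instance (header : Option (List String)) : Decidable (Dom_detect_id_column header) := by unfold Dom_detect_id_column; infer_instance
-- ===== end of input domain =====

-- B rewrite: one pass over the headers keeping the best (lowest) priority rank and its
-- first index, instead of A's per-key membership test plus list.index rescans (alternative
-- decomposition, not claimed faster on the measured sizes).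

-- ===== PORT A =====
def pvKeys : List String := ["numeric_id", "node_id", "id", "userid", "user_id"]

-- A's `for key in [...]: if key in lowered: return lowered.index(key)` loop
def pvALoop (lowered : List String) : List String → Int
  | [] => 0
  | k :: ks =>
    if k ∈ lowered then (((PySem.List.index? lowered k).getD 0 : Nat) : Int)
    else pvALoop lowered ks

def detect_id_column (header : Option (List String)) : Int :=
  match header with
  | none => 0
  | some hs =>
    let lowered := hs.map (fun h => PySem.Str.lower (PySem.Str.strip h))
    pvALoop lowered pvKeys

-- ===== PORT B =====
def pvRankDict : PySem.Dict String Int :=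
  PySem.Dict.ofList [("numeric_id", 0), ("node_id", 1), ("id", 2), ("userid", 3), ("user_id", 4)]

def detect_id_column_alt (header : Option (List String)) : Int :=
  match header with
  | none => 0
  | some hs =>
    let final := (PySem.List.enumerate hs 0).foldl
      (fun (acc : Int × Int) (p : Int × String) =>
        let r := PySem.Dict.getD pvRankDict (PySem.Str.lower (PySem.Str.strip p.2)) 5
        if r < acc.1 then (r, p.1) else acc)
      (5, 0)
    final.2

-- ===== PRECONDITION & SPEC =====
def Spec_detect_id_column (header : Option (List String)) (out : Int) : Prop := out = detect_id_column_alt header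
instance (header : Option (List String)) (out : Int) : Decidable (Spec_detect_id_column header out) := by unfold Spec_detect_id_column; infer_instance

-- ===== CLAIM (what is proved, stated in full; the proofs are below) =====
def Claim_equal_detect_id_column : Prop := ∀ (header : Option (List String)), Dom_detect_id_column header → Spec_detect_id_column header (detect_id_column header)

-- ===== LEMMAS AND PROOFS =====

-- the normalisation both versions apply to a header cell
def pvF (h : String) : String := PySem.Str.lower (PySem.Str.strip h)

-- rank of a normalised cell: position in pvKeys, 5 if absent
def pvRankN (s : String) : Nat :=
  if s = "numeric_id" then 0
  else if s = "node_id" then 1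
  else if s = "id" then 2
  else if s = "userid" then 3
  else if s = "user_id" then 4
  else 5

-- (rank, index) of the final update B's scan performs starting from best rank br, none if no update
def pvBest (br : Nat) : List String → Option (Nat × Nat)
  | [] => none
  | h :: t =>
    if pvRankN (pvF h) < br then
      match pvBest (pvRankN (pvF h)) t with
      | some (r', j) => some (r', j + 1)
      | none => some (pvRankN (pvF h), 0)
    else (pvBest br t).map (fun p => (p.1, p.2 + 1))

-- index of the first present key among ranks < b, checked in priority order
def pvPrio : Nat → List String → Option Nat
  | 0, _ => none
  | b + 1, L =>
    match pvPrio b L with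
    | some j => some j
    | none =>
      match pvKeys[b]? with
      | some k => PySem.List.index? L k
      | none => none

theorem pvBest_cons (br : Nat) (h : String) (t : List String) :
    pvBest br (h :: t) =
      if pvRankN (pvF h) < br then
        match pvBest (pvRankN (pvF h)) t with
        | some (r', j) => some (r', j + 1)
        | none => some (pvRankN (pvF h), 0)
      else (pvBest br t).map (fun p => (p.1, p.2 + 1)) := rfl

theorem pvKey_of_rank (s : String) (h : pvRankN s < 5) : pvKeys[pvRankN s]? = some s := by
  unfold pvRankN at *
  split_ifs at h ⊢ <;> simp_all [pvKeys]

theorem pvRank_of_key (s : String) (q : Nat) (hq : q < 5) (h : pvKeys[q]? = some s) :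
    pvRankN s = q := by
  interval_cases q <;> simp [pvKeys] at h <;> simp [pvRankN, ← h]

theorem pvRankDict_items :
    pvRankDict.items =
      [("numeric_id", (0 : Int)), ("node_id", 1), ("id", 2), ("userid", 3), ("user_id", 4)] := rfl

theorem pvRankDict_getD (s : String) :
    PySem.Dict.getD pvRankDict s 5 = ((pvRankN s : Nat) : Int) := by
  by_cases h0 : s = "numeric_id"
  · subst h0; rfl
  by_cases h1 : s = "node_id"
  · subst h1; rfl
  by_cases h2 : s = "id"
  · subst h2; rfl
  by_cases h3 : s = "userid"
  · subst h3; rfl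
  by_cases h4 : s = "user_id"
  · subst h4; rfl
  have hf : List.find? (fun p => p.1 == s) pvRankDict.items = none := by
    rw [List.find?_eq_none]
    intro p hp
    rw [pvRankDict_items] at hp
    simp only [List.mem_cons, List.not_mem_nil, or_false] at hp
    rcases hp with rfl | rfl | rfl | rfl | rfl <;> simp [beq_iff_eq] <;>
      [exact fun h => h0 h.symm; exact fun h => h1 h.symm; exact fun h => h2 h.symm;
       exact fun h => h3 h.symm; exact fun h => h4 h.symm]
  simp [PySem.Dict.getD, PySem.Dict.get?, hf, pvRankN, h0, h1, h2, h3, h4]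

theorem pvPrio_succ (b : Nat) (L : List String) :
    pvPrio (b + 1) L =
      match pvPrio b L with
      | some j => some j
      | none =>
        match pvKeys[b]? with
        | some k => PySem.List.index? L k
        | none => none := rfl

theorem pvPrio_nil (b : Nat) : pvPrio b [] = none := by
  induction b with
  | zero => rfl
  | succ b ih =>
    rw [pvPrio_succ, ih]
    cases pvKeys[b]? <;> simp [PySem.List.index?]

-- SL1: head is no key of rank < b ⇒ scanning shifts
theorem pvPrio_cons_shift (b : Nat) (s : String) (M : List String)
    (hs : ∀ q, q < b → ∀ k, pvKeys[q]? = some k → k ≠ s) :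
    pvPrio b (s :: M) = (pvPrio b M).map (· + 1) := by
  induction b with
  | zero => rfl
  | succ b ih =>
    have ih' := ih (fun q hq => hs q (Nat.lt_succ_of_lt hq))
    rw [pvPrio_succ, pvPrio_succ, ih']
    cases hM : pvPrio b M with
    | some j => simp
    | none =>
      simp only [Option.map_none]
      cases hk : pvKeys[b]? with
      | none => simp
      | some k =>
        have hne : s ≠ k := fun h => (hs b (Nat.lt_succ_self b) k hk) h.symm
        show PySem.List.index? (s :: M) k = Option.map (fun x => x + 1) (PySem.List.index? M k)
        exact PySem.List.index?_cons_of_ne M hne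

-- SL2: head is the key of rank r < b ⇒ it wins unless a strictly better key occurs in the tail
theorem pvPrio_cons_key (b : Nat) (s : String) (M : List String) (r : Nat)
    (hr : pvRankN s = r) (hrb : r < b) (hb : b ≤ 5) :
    pvPrio b (s :: M) =
      match pvPrio r M with
      | some j => some (j + 1)
      | none => some 0 := by
  induction b with
  | zero => omega
  | succ b ih =>
    by_cases hlt : r < b
    · have ihb := ih hlt (by omega)
      rw [pvPrio_succ, ihb]
      cases pvPrio r M <;> simp
    · have hrb' : r = b := by omega
      subst hrb'
      have hshift : pvPrio r (s :: M) = (pvPrio r M).map (· + 1) := by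
        apply pvPrio_cons_shift
        intro q hq k hk hks
        have : pvRankN s = q := pvRank_of_key s q (by omega) (by rw [hk, hks])
        omega
      rw [pvPrio_succ, hshift]
      cases hM : pvPrio r M with
      | some j => simp
      | none =>
        have hk : pvKeys[r]? = some s := by rw [← hr]; exact pvKey_of_rank s (by omega)
        simp only [Option.map_none, hk]
        exact PySem.List.index?_cons_self s M

-- main bridge: B's scan result = A's priority search, for any starting best rank ≤ 5
theorem pvBest_eq_prio (hs : List String) (br : Nat) (hbr : br ≤ 5) :
    (pvBest br hs).map (·.2) = pvPrio br (hs.map pvF) := by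
  induction hs generalizing br with
  | nil => simp [pvBest, pvPrio_nil]
  | cons h t ih =>
    simp only [List.map_cons]
    by_cases hlt : pvRankN (pvF h) < br
    · have hmain := ih (pvRankN (pvF h)) (by omega)
      rw [pvPrio_cons_key br (pvF h) (t.map pvF) (pvRankN (pvF h)) rfl hlt hbr]
      rw [← hmain, pvBest_cons, if_pos hlt]
      cases pvBest (pvRankN (pvF h)) t with
      | none => simp
      | some p => cases p; simp
    · have hmain := ih br hbr
      rw [pvPrio_cons_shift br (pvF h) (t.map pvF)
        (fun q hq k hk hks => by
          have : pvRankN (pvF h) = q := pvRank_of_key (pvF h) q (by omega) (by rw [hk, hks])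
          omega)]
      rw [← hmain, pvBest_cons, if_neg hlt]
      cases pvBest br t with
      | none => simp
      | some p => cases p; simp

-- A's loop over the literal key list computes pvPrio 5
theorem pvALoop_eq_prio (L : List String) :
    pvALoop L pvKeys =
      match pvPrio 5 L with
      | some j => (j : Int)
      | none => 0 := by
  have none_of : ∀ k : String, k ∉ L → List.idxOf? k L = none := fun k hk => by
    rw [← PySem.List.index?_eq_idxOf?]; exact (PySem.List.index?_eq_none_iff L k).mpr hk
  have some_of : ∀ k : String, k ∈ L → ∃ j, List.idxOf? k L = some j := fun k hk => by
    rw [← PySem.List.index?_eq_idxOf?]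
    exact Option.isSome_iff_exists.mp ((PySem.List.index?_isSome_iff L k).mpr hk)
  by_cases h0 : "numeric_id" ∈ L
  · obtain ⟨j, hj⟩ := some_of _ h0
    simp [pvALoop, pvKeys, pvPrio, h0, hj]
  by_cases h1 : "node_id" ∈ L
  · obtain ⟨j, hj⟩ := some_of _ h1
    simp [pvALoop, pvKeys, pvPrio, h0, h1, hj, none_of _ h0]
  by_cases h2 : "id" ∈ L
  · obtain ⟨j, hj⟩ := some_of _ h2
    simp [pvALoop, pvKeys, pvPrio, h0, h1, h2, hj, none_of _ h0, none_of _ h1]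
  by_cases h3 : "userid" ∈ L
  · obtain ⟨j, hj⟩ := some_of _ h3
    simp [pvALoop, pvKeys, pvPrio, h0, h1, h2, h3, hj, none_of _ h0, none_of _ h1, none_of _ h2]
  by_cases h4 : "user_id" ∈ L
  · obtain ⟨j, hj⟩ := some_of _ h4
    simp [pvALoop, pvKeys, pvPrio, h0, h1, h2, h3, h4, hj, none_of _ h0, none_of _ h1,
      none_of _ h2, none_of _ h3]
  · simp [pvALoop, pvKeys, pvPrio, h0, h1, h2, h3, h4, none_of _ h0, none_of _ h1,
      none_of _ h2, none_of _ h3, none_of _ h4]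

-- B's fold computes pvBest (with the running index threaded through)
theorem pvFoldB (hs : List String) (br : Nat) (bi i : Int) :
    ((PySem.List.enumerate hs i).foldl
      (fun (acc : Int × Int) (p : Int × String) =>
        let r := PySem.Dict.getD pvRankDict (PySem.Str.lower (PySem.Str.strip p.2)) 5
        if r < acc.1 then (r, p.1) else acc)
      ((br : Int), bi)).2 =
      match pvBest br hs with
      | some (r, j) => i + (j : Int)
      | none => bi := by
  induction hs generalizing br bi i with
  | nil => simp [PySem.List.enumerate_nil, pvBest]
  | cons h t ih =>
    rw [PySem.List.enumerate_cons]
    simp only [List.foldl_cons]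
    rw [show (PySem.Str.lower (PySem.Str.strip h)) = pvF h from rfl, pvRankDict_getD]
    by_cases hlt : pvRankN (pvF h) < br
    · rw [if_pos (by exact_mod_cast hlt)]
      rw [ih (pvRankN (pvF h)) i (i + 1), pvBest_cons, if_pos hlt]
      cases pvBest (pvRankN (pvF h)) t with
      | none => simp
      | some p => cases p with | mk r j => push_cast; ring
    · rw [if_neg (by exact_mod_cast hlt)]
      rw [ih br bi (i + 1), pvBest_cons, if_neg hlt]
      cases pvBest br t with
      | none => simp
      | some p =>
        cases p with | mk r j => simp only [Option.map_some]; push_cast; ring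

-- ===== VERDICT (by name: the statement is the Claim_ definition above) =====
theorem detect_id_column_spec : Claim_equal_detect_id_column := by
  intro header _
  unfold Spec_detect_id_column detect_id_column detect_id_column_alt
  cases header with
  | none => rfl
  | some hs =>
    simp only
    rw [show ((5 : Int), (0 : Int)) = (((5 : Nat) : Int), (0 : Int)) by norm_num]
    rw [pvFoldB hs 5 0 0]
    rw [show (fun h => PySem.Str.lower (PySem.Str.strip h)) = pvF from rfl]
    rw [pvALoop_eq_prio, ← pvBest_eq_prio hs 5 (le_refl 5)]
    cases pvBest 5 hs with
    | none => rfl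
    | some p => cases p; simp
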